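-- pv_equiv track=rewrite | github.com/Suren76/Python | python procedural programing/homework4/homework4_part1/test9.py | sum_maxmin
-- ===== SOURCE A (Python) =====
-- def sum_maxmin(array):
--     maximum = 0
--     for word in array:
--         if len(word) > maximum:
--             maximum = len(word)
--     minimum = maximum
--     for word in array:
--         if len(word) < minimum:
--             minimum = len(word)
--     return maximum+minimum
-- ===== SOURCE B (Python) =====
-- def sum_maxmin(array):
--     lens = sorted(len(w) for w in array)
--     return lens[0] + lens[-1] if lens else 0
-- ===== Notes on version B (the rewrite author's own statement) =====
-- stated objective: alternative
-- what changed: Replaces A's two accumulator scans (max seeded at 0, then min seeded at the max) with a sort of the lengths: the answer is the first plus the last element of the sorted lengths list (0 for an empty list).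
import Mathlib
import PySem

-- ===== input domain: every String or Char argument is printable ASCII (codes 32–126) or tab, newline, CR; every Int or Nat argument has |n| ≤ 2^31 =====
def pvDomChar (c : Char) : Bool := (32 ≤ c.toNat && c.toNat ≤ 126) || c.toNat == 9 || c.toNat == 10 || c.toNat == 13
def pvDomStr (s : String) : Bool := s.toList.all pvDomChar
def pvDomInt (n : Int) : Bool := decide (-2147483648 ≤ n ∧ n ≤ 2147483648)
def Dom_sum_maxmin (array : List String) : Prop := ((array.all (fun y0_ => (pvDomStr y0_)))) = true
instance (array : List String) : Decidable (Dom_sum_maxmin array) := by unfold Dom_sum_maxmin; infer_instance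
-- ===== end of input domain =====

-- B computes the answer by sorting the word lengths and adding the first and last element
-- (0 for the empty list), instead of A's two sequential accumulator scans; equal return value proved on Dom.


-- ===== PORT A =====
def sum_maxmin (array : List String) : Int :=
  let maximum := array.foldl (fun m w => if PySem.Str.len w > m then PySem.Str.len w else m) 0
  let minimum := array.foldl (fun m w => if PySem.Str.len w < m then PySem.Str.len w else m) maximum
  maximum + minimum

-- ===== PORT B =====
def sum_maxmin_alt (array : List String) : Int :=
  let lens := PySem.List.sorted (array.map (fun w => PySem.Str.len w)) (fun x => x) false
  match lens with
  | [] => 0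
  | h :: t => h + (h :: t).getLast (by simp)

-- ===== PRECONDITION & SPEC =====
def Spec_sum_maxmin (array : List String) (out : Int) : Prop := out = sum_maxmin_alt array
instance (array : List String) (out : Int) : Decidable (Spec_sum_maxmin array out) := by unfold Spec_sum_maxmin; infer_instance

-- ===== CLAIM (what is proved, stated in full; the proofs are below) =====
def Claim_equal_sum_maxmin : Prop := ∀ (array : List String), Dom_sum_maxmin array → Spec_sum_maxmin array (sum_maxmin array)

-- ===== LEMMAS AND PROOFS =====

-- A's if-accumulator loops are folds of max / min over the lengths list
theorem foldl_ifmax_eq (l : List String) (a : Int) :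
    l.foldl (fun m w => if PySem.Str.len w > m then PySem.Str.len w else m) a
      = (l.map (fun w => PySem.Str.len w)).foldl max a := by
  induction l generalizing a with
  | nil => rfl
  | cons h t ih =>
    simp only [List.foldl, List.map]
    rw [ih]
    congr 1
    simp only [max_def]
    split_ifs <;> omega

theorem foldl_ifmin_eq (l : List String) (a : Int) :
    l.foldl (fun m w => if PySem.Str.len w < m then PySem.Str.len w else m) a
      = (l.map (fun w => PySem.Str.len w)).foldl min a := by
  induction l generalizing a with
  | nil => rfl
  | cons h t ih =>
    simp only [List.foldl, List.map]
    rw [ih]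
    congr 1
    simp only [min_def]
    split_ifs <;> omega

-- folds of max / min are permutation-invariant
theorem foldl_max_perm {l₁ l₂ : List Int} (p : l₁.Perm l₂) (a : Int) :
    l₁.foldl max a = l₂.foldl max a :=
  @List.Perm.foldl_eq _ _ max _ _ ⟨fun a b c => max_right_comm a b c⟩ p a

theorem foldl_min_perm {l₁ l₂ : List Int} (p : l₁.Perm l₂) (a : Int) :
    l₁.foldl min a = l₂.foldl min a :=
  @List.Perm.foldl_eq _ _ min _ _ ⟨fun a b c => min_right_comm a b c⟩ p a

-- on an ascending list, the max fold reaches the last element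
theorem foldl_max_sorted (l : List Int) (a : Int) (hs : l.Pairwise (· ≤ ·)) (hne : l ≠ []) :
    l.foldl max a = max a (l.getLast hne) := by
  induction l generalizing a with
  | nil => exact absurd rfl hne
  | cons h t ih =>
    cases t with
    | nil => simp [List.foldl, List.getLast]
    | cons h2 t2 =>
      have hs' := List.Pairwise.of_cons hs
      have hhead : h ≤ (h2 :: t2).getLast (by simp) :=
        List.rel_of_pairwise_cons hs (List.getLast_mem _)
      have hgl : (h :: h2 :: t2).getLast hne = (h2 :: t2).getLast (by simp) := rfl
      rw [List.foldl_cons, ih (max a h) hs' (by simp), hgl, max_assoc]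
      congr 1
      exact max_eq_right hhead

-- on an ascending list, the min fold reaches the head
theorem foldl_min_sorted (h : Int) (t : List Int) (a : Int) (hs : (h :: t).Pairwise (· ≤ ·)) :
    (h :: t).foldl min a = min a h := by
  induction t generalizing h a with
  | nil => simp [List.foldl]
  | cons h2 t2 ih =>
    have hle : h ≤ h2 := List.rel_of_pairwise_cons hs (by simp)
    have hs' : (h2 :: t2).Pairwise (· ≤ ·) := List.Pairwise.of_cons hs
    rw [List.foldl_cons, ih h2 (min a h) hs']
    rw [min_assoc]
    congr 1
    exact min_eq_left hle

theorem sum_maxmin_spec : Claim_equal_sum_maxmin := by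
  intro array _
  unfold Spec_sum_maxmin
  simp only [sum_maxmin, sum_maxmin_alt]
  set L := array.map (fun w => PySem.Str.len w) with hL
  have hperm : (PySem.List.sorted L (fun x => x) false).Perm L := PySem.List.sorted_perm _ _ _
  have hpw : (PySem.List.sorted L (fun x => x) false).Pairwise (· ≤ ·) := by
    simpa using PySem.List.sorted_pairwise (xs := L) (key := fun x => x)
  rw [foldl_ifmax_eq, foldl_ifmin_eq, ← hL,
      foldl_max_perm hperm.symm, foldl_min_perm hperm.symm]
  cases hs : PySem.List.sorted L (fun x => x) false with
  | nil => simp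
  | cons h t =>
    rw [hs] at hpw hperm
    have hnonneg : ∀ x ∈ h :: t, 0 ≤ x := by
      intro x hx
      have := hperm.mem_iff.mp hx
      rw [hL] at this
      obtain ⟨w, _, rfl⟩ := List.mem_map.mp this
      simp [PySem.Str.len_eq]
    have hlastmem : (h :: t).getLast (by simp) ∈ h :: t := List.getLast_mem _
    have h0 : (0 : Int) ≤ (h :: t).getLast (by simp) := hnonneg _ hlastmem
    have hhle : h ≤ (h :: t).getLast (by simp) := by
      rcases List.mem_cons.mp hlastmem with heq | hmem
      · exact le_of_eq heq.symm
      · exact List.rel_of_pairwise_cons hpw hmem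
    rw [foldl_max_sorted _ _ hpw (by simp), max_eq_right h0,
        foldl_min_sorted _ _ _ hpw, min_eq_right hhle]
    ring
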